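-- pv_equiv track=rewrite | github.com/zazabap/problem-reductions | docs/paper/verify-reductions/adversary_minimum_dominating_set_min_max_multicenter.py | adv_solve_mc
-- ===== SOURCE A (Python) =====
-- from collections import deque
-- from itertools import combinations
-- from typing import Optional
--
-- def adv_bfs_distances(adj: list[set[int]], config: list[int]) -> Optional[list[int]]:
--     """Multi-source BFS from all centers. Returns distances or None if unreachable."""
--     n = len(adj)
--     dist = [-1] * n
--     q = deque()
--     for v in range(n):
--         if config[v] == 1:
--             dist[v] = 0
--             q.append(v)
--     while q:
--         u = q.popleft()
--         for w in adj[u]: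
--             if dist[w] == -1:
--                 dist[w] = dist[u] + 1
--                 q.append(w)
--     if any(d == -1 for d in dist):
--         return None
--     return dist
--
-- def adv_is_feasible_multicenter(adj: list[set[int]], config: list[int], k: int) -> bool:
--     """Check feasibility with B=1, unit weights."""
--     if sum(config) != k:
--         return False
--     distances = adv_bfs_distances(adj, config)
--     if distances is None:
--         return False
--     return max(distances) <= 1
--
-- def adv_solve_mc(adj: list[set[int]], k: int) -> Optional[list[int]]:
--     """Brute-force multicenter solver (B=1, unit weights)."""
--     n = len(adj)
--     for chosen in combinations(range(n), k):
--         cfg = [0] * n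
--         for v in chosen:
--             cfg[v] = 1
--         if adv_is_feasible_multicenter(adj, cfg, k):
--             return cfg
--     return None
-- ===== SOURCE B (Python) =====
-- def adv_solve_mc(adj, k):
--     """Bitmask re-implementation: closed-neighborhood masks OR-ed along a
--     lexicographic DFS over k-subsets; a subset is feasible iff its coverage
--     mask equals the full mask (replaces the per-subset BFS entirely)."""
--     n = len(adj)
--     if k < 0 or k > n:
--         return None  # no k-subset of n vertices exists
--     if k == 0:
--         return [0] * n if n == 0 else None  # empty center set dominates only the empty graph
--     full = (1 << n) - 1
--     nb = []
--     for v in range(n):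
--         m = 1 << v
--         for w in adj[v]:
--             m |= 1 << w
--         nb.append(m)
--
--     def rec(start, count, cover, chosen):
--         if count == k:
--             if cover == full:
--                 return [1 if v in chosen else 0 for v in range(n)]
--             return None
--         for v in range(start, n):
--             res = rec(v + 1, count + 1, cover | nb[v], chosen + (v,))
--             if res is not None:
--                 return res
--         return None
--
--     return rec(0, 0, 0, ())
-- ===== Notes on version B (the rewrite author's own statement) =====
-- stated objective: alternative
-- what changed: The per-subset multi-source BFS (distance array + FIFO queue, feasible iff all distances in {0,1}) is replaced by OR-ing precomputed closed-neighborhood bitmasks along a recursive lexicographic subset search, feasible iff the coverage mask equals the full mask; the combinations enumeration order and first-found result are unchanged.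
-- outside the precondition, e.g. on adv_solve_mc([{1, -1}, set()], 1): A returns [1, 0], B raises ValueError
import Mathlib
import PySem

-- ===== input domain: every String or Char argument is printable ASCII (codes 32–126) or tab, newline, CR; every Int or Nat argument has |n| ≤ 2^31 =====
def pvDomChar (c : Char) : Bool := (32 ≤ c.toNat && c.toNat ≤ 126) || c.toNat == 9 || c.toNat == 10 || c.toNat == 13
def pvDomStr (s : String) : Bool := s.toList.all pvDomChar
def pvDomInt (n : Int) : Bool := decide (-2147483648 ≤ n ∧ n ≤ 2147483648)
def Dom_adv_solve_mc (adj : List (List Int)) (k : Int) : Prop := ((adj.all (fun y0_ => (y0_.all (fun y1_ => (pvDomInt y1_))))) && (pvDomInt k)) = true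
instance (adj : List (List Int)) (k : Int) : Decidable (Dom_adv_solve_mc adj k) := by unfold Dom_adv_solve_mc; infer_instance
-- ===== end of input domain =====

-- B replaces A's per-subset multi-source BFS feasibility check by OR-ing precomputed
-- closed-neighborhood bitmasks along a recursive lexicographic subset search (alternative algorithm, same enumeration order).


-- ===== PORT A =====

-- sum(config)
def pvSum (l : List Int) : Int := l.foldl (· + ·) 0

-- itertools.combinations(l, r), in itertools' lexicographic order
def pvCombos : List Int → Nat → List (List Int)
  | _, 0 => [[]]
  | [], _ + 1 => []
  | x :: xs, r + 1 => ((pvCombos xs r).map (x :: ·)) ++ pvCombos xs (r + 1)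

-- one BFS edge relaxation: `if dist[w] == -1: dist[w] = dist[u] + 1; q.append(w)`
-- (pyGetD's default 0 is only reached where the Python raises IndexError — outside Pre_)
def pvRelax (u : Int) (s : List Int × List Int) (w : Int) : List Int × List Int :=
  if PySem.List.pyGetD s.1 w 0 = -1 then
    (PySem.List.pySetD s.1 w (PySem.List.pyGetD s.1 u 0 + 1), s.2 ++ [w])
  else s

-- a cell read as -1 is a real in-range cell, and pySetD really sets it
theorem pvGetD_neg_one_split (xs : List Int) (w : Int) (v : Int)
    (h : PySem.List.pyGetD xs w 0 = -1) :
    ∃ j, ∃ (hj : j < xs.length), xs[j] = -1 ∧ PySem.List.pySetD xs w v = xs.set j v := by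
  unfold PySem.List.pyGetD PySem.List.pyGet? PySem.List.pySetD PySem.List.pySet?
    PySem.List.pyIdx? at *
  split_ifs at h ⊢ with h1 h2 h3
  · have hj : w.toNat < xs.length := by omega
    refine ⟨w.toNat, hj, ?_, rfl⟩
    simpa [List.getElem?_eq_getElem hj] using h
  · simp at h
  · have hj : xs.length - (-w).toNat < xs.length := by omega
    refine ⟨xs.length - (-w).toNat, hj, ?_, rfl⟩
    simpa [List.getElem?_eq_getElem hj] using h
  · simp at h

theorem pvGetD_lb (xs : List Int) (u : Int) (hlb : ∀ x ∈ xs, -1 ≤ x) :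
    -1 ≤ PySem.List.pyGetD xs u 0 := by
  unfold PySem.List.pyGetD
  cases hg : PySem.List.pyGet? xs u with
  | none => simp
  | some x => simpa using hlb x (PySem.List.mem_of_pyGet?_eq_some _ hg)

-- termination/lower-bound facts for the relax fold (cited by the port's definition)
theorem pvRelaxFold_inv (u : Int) (ws : List Int) : ∀ (dist q : List Int),
    (∀ x ∈ dist, -1 ≤ x) →
    (∀ x ∈ (ws.foldl (pvRelax u) (dist, q)).1, -1 ≤ x) ∧
    (ws.foldl (pvRelax u) (dist, q)).1.countP (fun x => decide (x = -1)) +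
      (ws.foldl (pvRelax u) (dist, q)).2.length ≤
      dist.countP (fun x => decide (x = -1)) + q.length := by
  induction ws with
  | nil => intro dist q hlb; exact ⟨hlb, le_rfl⟩
  | cons w ws ih =>
    intro dist q hlb
    rw [List.foldl_cons]
    by_cases hg : PySem.List.pyGetD dist w 0 = -1
    · have hdu : -1 ≤ PySem.List.pyGetD dist u 0 := pvGetD_lb dist u hlb
      obtain ⟨j, hj, hcell, hset⟩ :=
        pvGetD_neg_one_split dist w (PySem.List.pyGetD dist u 0 + 1) hg
      have hstep : pvRelax u (dist, q) w =
          (dist.set j (PySem.List.pyGetD dist u 0 + 1), q ++ [w]) := by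
        simp [pvRelax, hg, hset]
      rw [hstep]
      have hlb' : ∀ x ∈ dist.set j (PySem.List.pyGetD dist u 0 + 1), -1 ≤ x := by
        intro x hx
        rcases List.mem_or_eq_of_mem_set hx with hx' | rfl
        · exact hlb x hx'
        · omega
      obtain ⟨l1, l2⟩ := ih _ _ hlb'
      refine ⟨l1, ?_⟩
      have hcnt : (dist.set j (PySem.List.pyGetD dist u 0 + 1)).countP (fun x => decide (x = -1))
          = dist.countP (fun x => decide (x = -1)) - 1 := by
        rw [List.countP_set hj]
        simp [hcell]
        omega
      have hpos : 0 < dist.countP (fun x => decide (x = -1)) :=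
        List.countP_pos_iff.mpr ⟨dist[j], List.getElem_mem hj, by simp [hcell]⟩
      rw [hcnt] at l2
      simp only [List.length_append, List.length_cons, List.length_nil] at l2 ⊢
      omega
    · have hstep : pvRelax u (dist, q) w = (dist, q) := by simp [pvRelax, hg]
      rw [hstep]; exact ih dist q hlb

def pvBfsLoop (adj : List (List Int)) (dist : List Int) (q : List Int)
    (h : ∀ x ∈ dist, -1 ≤ x) : List Int :=
  match q with
  | [] => dist
  | u :: qs =>
    pvBfsLoop adj
      (((PySem.List.pyGet? adj u).getD []).foldl (pvRelax u) (dist, qs)).1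
      (((PySem.List.pyGet? adj u).getD []).foldl (pvRelax u) (dist, qs)).2
      ((pvRelaxFold_inv u ((PySem.List.pyGet? adj u).getD []) dist qs h).1)
termination_by dist.countP (fun x => decide (x = -1)) + q.length
decreasing_by
  have := (pvRelaxFold_inv u ((PySem.List.pyGet? adj u).getD []) dist qs h).2
  simp only [List.length_cons]; omega

-- the init fold only writes 0s, so cells stay ≥ -1 (cited by adv_bfs_distances)
theorem pvInitFold_lb (config : List Int) (L : List Int) : ∀ (dist q : List Int),
    (∀ x ∈ dist, -1 ≤ x) →
    ∀ x ∈ (L.foldl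
        (fun (s : List Int × List Int) v =>
          if PySem.List.pyGetD config v 0 = 1 then (PySem.List.pySetD s.1 v 0, s.2 ++ [v]) else s)
        (dist, q)).1, -1 ≤ x := by
  induction L with
  | nil => intro dist q hlb; exact hlb
  | cons v L ih =>
    intro dist q hlb
    rw [List.foldl_cons]
    split
    · refine ih _ _ ?_
      intro x hx
      unfold PySem.List.pySetD at hx
      cases hs : PySem.List.pySet? dist v 0 with
      | none => rw [hs] at hx; exact hlb x hx
      | some d' =>
        rw [hs] at hx
        simp only [Option.getD_some] at hx
        unfold PySem.List.pySet? at hs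
        cases hi : PySem.List.pyIdx? dist.length v with
        | none => simp [hi] at hs
        | some j =>
          simp [hi] at hs
          subst hs
          rcases List.mem_or_eq_of_mem_set hx with hx' | rfl
          · exact hlb x hx'
          · omega
    · exact ih dist q hlb

def adv_bfs_distances (adj : List (List Int)) (config : List Int) : Option (List Int) :=
  let init := (PySem.List.pyRange 0 (adj.length : Int) 1).foldl
    (fun (s : List Int × List Int) v =>
      if PySem.List.pyGetD config v 0 = 1 then (PySem.List.pySetD s.1 v 0, s.2 ++ [v]) else s)
    (List.replicate adj.length (-1), [])
  let dist := pvBfsLoop adj init.1 init.2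
    (pvInitFold_lb config _ _ _ (by intro x hx; rw [List.eq_of_mem_replicate hx]))
  if dist.any (fun d => d == -1) then none else some dist

def adv_is_feasible_multicenter (adj : List (List Int)) (config : List Int) (k : Int) : Bool :=
  if pvSum config ≠ k then false
  else match adv_bfs_distances adj config with
    | none => false
    | some distances =>
      match PySem.List.max? distances (fun x => x) with
      | some m => decide (m ≤ 1)
      | none => false   -- Python's max([]) raises ValueError here; outside Pre_

def adv_solve_mc (adj : List (List Int)) (k : Int) : Option (List Int) :=
  -- combinations(range(n), k) raises ValueError for k < 0 (outside Pre_): k.toNat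
  (pvCombos (PySem.List.pyRange 0 (adj.length : Int) 1) k.toNat).findSome? (fun chosen =>
    let cfg := chosen.foldl (fun c v => PySem.List.pySetD c v 1) (List.replicate adj.length 0)
    if adv_is_feasible_multicenter adj cfg k then some cfg else none)

-- ===== PORT B =====

-- m = 1 << v; for w in adj[v]: m |= 1 << w   (w.toNat: Python raises on a negative shift; outside Pre_)
def pvNbMask (v : Nat) (row : List Int) : Nat :=
  row.foldl (fun m w => m ||| (1 <<< w.toNat)) (1 <<< v)

def pvNbList (adj : List (List Int)) : List Nat :=
  (List.range adj.length).map (fun v => pvNbMask v (adj.getD v []))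

-- [1 if v in chosen else 0 for v in range(n)]
def pvCfg (n : Nat) (chosen : List Int) : List Int :=
  (PySem.List.pyRange 0 (n : Int) 1).map (fun v => if chosen.contains v then 1 else 0)

def pvRecB (nb : List Nat) (n : Nat) (full : Nat) (k : Int) :
    Nat → Int → Nat → List Int → Option (List Int)
  | start, count, cover, chosen =>
    if count = k then (if cover = full then some (pvCfg n chosen) else none)
    else if _h : start < n then
      match pvRecB nb n full k (start + 1) (count + 1) (cover ||| nb.getD start 0)
          (chosen ++ [(start : Int)]) with
      | some r => some r
      | none => pvRecB nb n full k (start + 1) count cover chosen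
    else none
termination_by start => n - start

def adv_solve_mc_alt (adj : List (List Int)) (k : Int) : Option (List Int) :=
  if k < 0 ∨ (adj.length : Int) < k then none       -- no k-subset of n vertices exists
  else if k = 0 then
    (if adj.length = 0 then some (List.replicate adj.length 0) else none)
  else pvRecB (pvNbList adj) adj.length ((1 <<< adj.length) - 1) k 0 0 0 []

-- ===== PRECONDITION & SPEC =====

-- Pre_ excludes k < 0 and the empty graph with k = 0 (A raises ValueError there), and — only
-- when the adjacency lists are actually dereferenced, i.e. 0 < k ≤ n — malformed graphs whose
-- entries are not in [0, n): there A raises IndexError when its BFS reaches such an entry, and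
-- otherwise relies on negative-index wraparound (entries in [-n, 0)) or on the entry going unvisited.
def Pre_adv_solve_mc (adj : List (List Int)) (k : Int) : Prop :=
  0 ≤ k ∧ ¬(adj = [] ∧ k = 0) ∧
  (k = 0 ∨ (adj.length : Int) < k ∨ ∀ row ∈ adj, ∀ w ∈ row, 0 ≤ w ∧ w < (adj.length : Int))
instance (adj : List (List Int)) (k : Int) : Decidable (Pre_adv_solve_mc adj k) := by
  unfold Pre_adv_solve_mc; infer_instance

def pvWitness_adv_solve_mc : List (List Int) × Int := ([[1], [0]], 1)

def Spec_adv_solve_mc (adj : List (List Int)) (k : Int) (out : Option (List Int)) : Prop :=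
  out = adv_solve_mc_alt adj k
instance (adj : List (List Int)) (k : Int) (out : Option (List Int)) :
    Decidable (Spec_adv_solve_mc adj k out) := by unfold Spec_adv_solve_mc; infer_instance

-- ===== CLAIM (what is proved, stated in full; the proofs are below) =====
def Claim_equal_adv_solve_mc : Prop := ∀ (adj : List (List Int)) (k : Int),
  Dom_adv_solve_mc adj k → Pre_adv_solve_mc adj k →
  Spec_adv_solve_mc adj k (adv_solve_mc adj k)

-- ===== LEMMAS AND PROOFS =====


theorem pvCombos_mem (l : List Int) : ∀ (r : Nat) (c : List Int), c ∈ pvCombos l r → c.Sublist l ∧ c.length = r := by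
  induction l with
  | nil =>
    intro r c hc
    cases r with
    | zero => simp [pvCombos] at hc; subst hc; exact ⟨List.Sublist.refl _, rfl⟩
    | succ r => simp [pvCombos] at hc
  | cons x xs ih =>
    intro r c hc
    cases r with
    | zero => simp [pvCombos] at hc; subst hc; exact ⟨List.nil_sublist _, rfl⟩
    | succ r =>
      rw [pvCombos] at hc
      rcases List.mem_append.mp hc with h | h
      · obtain ⟨c', hc', rfl⟩ := List.mem_map.mp h
        obtain ⟨hs, hl⟩ := ih r c' hc'
        exact ⟨hs.cons₂ x, by simp [hl]⟩
      · obtain ⟨hs, hl⟩ := ih (r + 1) c h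
        exact ⟨hs.cons x, hl⟩

theorem pvFindSome?_congr {α β : Type} (l : List α) (f g : α → Option β)
    (h : ∀ x ∈ l, f x = g x) : l.findSome? f = l.findSome? g := by
  induction l with
  | nil => rfl
  | cons x xs ih =>
    rw [List.findSome?_cons, List.findSome?_cons, h x (List.mem_cons_self ..)]
    cases g x with
    | none => exact ih (fun y hy => h y (List.mem_cons_of_mem x hy))
    | some b => rfl

theorem pvFoldlOr_acc {α : Type} (g : α → Nat) (c : List α) :
    ∀ (m : Nat), c.foldl (fun m v => m ||| g v) m = m ||| c.foldl (fun m v => m ||| g v) 0 := by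
  induction c with
  | nil => simp
  | cons x xs ih =>
    intro m
    simp only [List.foldl_cons]
    rw [ih (m ||| g x), ih (0 ||| g x)]
    simp [Nat.or_assoc]

def pvOrM (nb : List Nat) (c : List Int) : Nat :=
  c.foldl (fun m v => m ||| nb.getD v.toNat 0) 0

theorem pvOrM_cons (nb : List Nat) (x : Int) (c : List Int) :
    pvOrM nb (x :: c) = nb.getD x.toNat 0 ||| pvOrM nb c := by
  simp only [pvOrM, List.foldl_cons]
  rw [pvFoldlOr_acc]
  simp

theorem pvOrM_testBit (nb : List Nat) (c : List Int) (i : Nat) :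
    (pvOrM nb c).testBit i = true ↔ ∃ v ∈ c, (nb.getD v.toNat 0).testBit i = true := by
  induction c with
  | nil => simp [pvOrM]
  | cons x xs ih => rw [pvOrM_cons, Nat.testBit_or]; simp [ih]

theorem pvRecB_eq (nb : List Nat) (n : Nat) (full : Nat) (k : Int) :
    ∀ (d start : Nat) (count : Int) (cover : Nat) (chosen : List Int),
    n - start = d → 0 ≤ count → count ≤ k →
    pvRecB nb n full k start count cover chosen =
      (pvCombos (PySem.List.pyRange (start : Int) (n : Int) 1) (k - count).toNat).findSome?
        (fun rest => if cover ||| pvOrM nb rest = full then some (pvCfg n (chosen ++ rest))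
          else none) := by
  intro d
  induction d with
  | zero =>
    intro start count cover chosen hd h0 hk
    rw [pvRecB]
    by_cases hck : count = k
    · subst hck
      simp only [sub_self, Int.toNat_zero, pvCombos]
      by_cases hcv : cover = full <;>
        simp [List.findSome?, hcv, pvOrM]
    · have hlt : count < k := lt_of_le_of_ne hk hck
      have : (PySem.List.pyRange (start : Int) (n : Int) 1) = [] :=
        PySem.List.pyRange_one_eq_nil (by omega)
      rw [this]
      obtain ⟨m, hm⟩ : ∃ m, (k - count).toNat = m + 1 := ⟨(k - count).toNat - 1, by omega⟩
      rw [hm, if_neg hck, dif_neg (by omega : ¬ start < n)]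
      simp [pvCombos]
  | succ d ih =>
    intro start count cover chosen hd h0 hk
    rw [pvRecB]
    by_cases hck : count = k
    · subst hck
      simp only [sub_self, Int.toNat_zero, pvCombos]
      by_cases hcv : cover = full <;>
        simp [List.findSome?, hcv, pvOrM]
    · have hlt : count < k := lt_of_le_of_ne hk hck
      have hsn : start < n := by omega
      rw [PySem.List.pyRange_one_cons (by exact_mod_cast hsn)]
      obtain ⟨m, hm⟩ : ∃ m, (k - count).toNat = m + 1 := ⟨(k - count).toNat - 1, by omega⟩
      have hm' : (k - (count + 1)).toNat = m := by omega
      rw [hm, pvCombos, List.findSome?_append, List.findSome?_map]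
      have e1 : pvRecB nb n full k (start + 1) (count + 1)
            (cover ||| nb.getD start 0) (chosen ++ [(start : Int)]) =
          (pvCombos (PySem.List.pyRange ((start : Int) + 1) (n : Int) 1) m).findSome?
            ((fun rest => if cover ||| pvOrM nb rest = full then
                some (pvCfg n (chosen ++ rest)) else none) ∘ (((start : Int)) :: ·)) := by
        rw [ih (start + 1) (count + 1) (cover ||| nb.getD start 0) (chosen ++ [(start : Int)])
          (by omega) (by omega) (by omega), hm']
        push_cast
        apply pvFindSome?_congr
        intro rest _
        simp only [Function.comp_apply, pvOrM_cons, Int.toNat_natCast]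
        rw [← Nat.or_assoc, ← List.append_cons]
      have e2 : pvRecB nb n full k (start + 1) count cover chosen =
          (pvCombos (PySem.List.pyRange ((start : Int) + 1) (n : Int) 1) (m + 1)).findSome?
            (fun rest => if cover ||| pvOrM nb rest = full then
              some (pvCfg n (chosen ++ rest)) else none) := by
        rw [ih (start + 1) count cover chosen (by omega) h0 hk, hm]
        push_cast
        rfl
      rw [if_neg hck, dif_pos hsn, e1, e2]
      cases ((pvCombos (PySem.List.pyRange ((start : Int) + 1) (n : Int) 1) m).findSome?
        ((fun rest => if cover ||| pvOrM nb rest = full then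
            some (pvCfg n (chosen ++ rest)) else none) ∘ (((start : Int)) :: ·))) <;> simp

theorem pvCombos_nil : ∀ (l : List Int) (r : Nat), l.length < r → pvCombos l r = [] := by
  intro l
  induction l with
  | nil =>
    intro r hr
    cases r with
    | zero => omega
    | succ r => simp [pvCombos]
  | cons x xs ih =>
    intro r hr
    cases r with
    | zero => omega
    | succ r =>
      simp only [List.length_cons] at hr
      simp [pvCombos, ih r (by omega), ih (r + 1) (by omega)]

theorem pvAlt_eq (adj : List (List Int)) (k : Int) (hk : 0 ≤ k) :
    adv_solve_mc_alt adj k =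
      (pvCombos (PySem.List.pyRange 0 (adj.length : Int) 1) k.toNat).findSome?
        (fun rest => if pvOrM (pvNbList adj) rest = (1 <<< adj.length) - 1 then
          some (pvCfg adj.length rest) else none) := by
  unfold adv_solve_mc_alt
  by_cases hk0 : k = 0
  · subst hk0
    rw [if_neg (by omega), if_pos rfl]
    simp only [Int.toNat_zero, pvCombos, List.findSome?]
    by_cases hn : adj.length = 0
    · rw [if_pos hn, hn]
      have hfull : (1 <<< 0) - 1 = 0 := by decide
      simp [pvOrM, pvCfg, PySem.List.pyRange_one_eq_nil (by norm_num : (0:Int) ≤ 0)]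
    · rw [if_neg hn]
      have hfull : pvOrM (pvNbList adj) [] ≠ (1 <<< adj.length) - 1 := by
        simp only [pvOrM, List.foldl_nil]
        have h2 : 2 ≤ 2 ^ adj.length := by
          calc 2 = 2 ^ 1 := by norm_num
          _ ≤ 2 ^ adj.length := Nat.pow_le_pow_right (by norm_num) (by omega)
        rw [Nat.shiftLeft_eq, one_mul]
        omega
      simp [hfull]
  · by_cases hkn : (adj.length : Int) < k
    · rw [if_pos (Or.inr hkn), pvCombos_nil _ _
        (by rw [PySem.List.length_pyRange_one]; omega)]
      rfl
    · rw [if_neg (by omega), if_neg hk0,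
        pvRecB_eq (pvNbList adj) adj.length ((1 <<< adj.length) - 1) k adj.length 0 0 0 []
          (by omega) le_rfl hk]
      simp

theorem pvFoldlOr_testBit {α : Type} (g : α → Nat) (c : List α) (i : Nat) :
    (c.foldl (fun m v => m ||| g v) 0).testBit i = true ↔ ∃ v ∈ c, (g v).testBit i = true := by
  induction c with
  | nil => simp
  | cons x xs ih =>
    rw [List.foldl_cons, pvFoldlOr_acc, Nat.testBit_or]
    simp_all

theorem pvShiftOne_testBit (v i : Nat) : (1 <<< v).testBit i = decide (v = i) := by
  rw [Nat.shiftLeft_eq, one_mul, Nat.testBit_two_pow]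

theorem pvNbMask_testBit (v : Nat) (row : List Int) (i : Nat) :
    (pvNbMask v row).testBit i = true ↔ i = v ∨ ∃ w ∈ row, w.toNat = i := by
  unfold pvNbMask
  rw [pvFoldlOr_acc, Nat.testBit_or, Bool.or_eq_true, pvShiftOne_testBit, decide_eq_true_eq,
    pvFoldlOr_testBit]
  constructor
  · rintro (h | ⟨w, hw, hb⟩)
    · exact Or.inl h.symm
    · rw [pvShiftOne_testBit, decide_eq_true_eq] at hb
      exact Or.inr ⟨w, hw, hb⟩
  · rintro (h | ⟨w, hw, hb⟩)
    · exact Or.inl h.symm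
    · exact Or.inr ⟨w, hw, by rw [pvShiftOne_testBit, hb]; simp⟩

theorem pvNb_getD (adj : List (List Int)) (v : Nat) (hv : v < adj.length) :
    (pvNbList adj).getD v 0 = pvNbMask v (adj.getD v []) :=
  PySem.List.getD_map_range (fun v => pvNbMask v (adj.getD v [])) adj.length v 0 hv

def pvRow (adj : List (List Int)) (u : Int) : List Int := (PySem.List.pyGet? adj u).getD []

def pvCov (adj : List (List Int)) (chosen : List Int) (i : Nat) : Prop :=
  ((i : Int) ∈ chosen) ∨ ∃ u ∈ chosen, (i : Int) ∈ pvRow adj u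

theorem pvRow_eq (adj : List (List Int)) (u : Int) (h0 : 0 ≤ u) (h1 : u < (adj.length : Int)) :
    pvRow adj u = adj.getD u.toNat [] := by
  have hn : u.toNat < adj.length := by omega
  unfold pvRow
  rw [PySem.List.pyGet?_of_nonneg adj h0, List.getElem?_eq_getElem hn, List.getD_eq_getElem adj [] hn]
  rfl

theorem pvRow_mem (adj : List (List Int)) (u : Int) (h0 : 0 ≤ u) (h1 : u < (adj.length : Int)) :
    pvRow adj u ∈ adj := by
  rw [pvRow_eq adj u h0 h1, List.getD_eq_getElem adj [] (by omega)]
  exact List.getElem_mem _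

theorem pvMask_full_iff (adj : List (List Int)) (chosen : List Int)
    (hPre : ∀ row ∈ adj, ∀ w ∈ row, 0 ≤ w ∧ w < (adj.length : Int))
    (hmem : ∀ v ∈ chosen, 0 ≤ v ∧ v < (adj.length : Int)) :
    pvOrM (pvNbList adj) chosen = (1 <<< adj.length) - 1 ↔
      ∀ i < adj.length, pvCov adj chosen i := by
  have hfull : ∀ i : Nat, ((1 <<< adj.length) - 1).testBit i = decide (i < adj.length) := by
    intro i; rw [Nat.shiftLeft_eq, one_mul, Nat.testBit_two_pow_sub_one]
  constructor
  · intro he i hi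
    have hb : (pvOrM (pvNbList adj) chosen).testBit i = true := by
      rw [he, hfull]; simpa using hi
    obtain ⟨v, hv, hbit⟩ := (pvOrM_testBit _ _ _).mp hb
    obtain ⟨hv0, hvn⟩ := hmem v hv
    have hvt : v.toNat < adj.length := by omega
    rw [pvNb_getD adj v.toNat hvt] at hbit
    rcases (pvNbMask_testBit _ _ _).mp hbit with h | ⟨w, hw, hwi⟩
    · left
      have : (i : Int) = v := by omega
      rwa [this]
    · right
      refine ⟨v, hv, ?_⟩
      rw [pvRow_eq adj v hv0 hvn]
      have hw' := hPre _ (by rw [← pvRow_eq adj v hv0 hvn]; exact pvRow_mem adj v hv0 hvn) w hw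
      have : (i : Int) = w := by omega
      rwa [this]
  · intro hcov
    apply Nat.eq_of_testBit_eq
    intro i
    rw [hfull]
    by_cases hi : i < adj.length
    · simp only [hi, decide_true]
      apply (pvOrM_testBit _ _ _).mpr
      rcases hcov i hi with h | ⟨u, hu, hiu⟩
      · refine ⟨(i : Int), h, ?_⟩
        rw [Int.toNat_natCast, pvNb_getD adj i hi]
        exact (pvNbMask_testBit _ _ _).mpr (Or.inl rfl)
      · obtain ⟨hu0, hun⟩ := hmem u hu
        refine ⟨u, hu, ?_⟩
        rw [pvNb_getD adj u.toNat (by omega)]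
        apply (pvNbMask_testBit _ _ _).mpr
        right
        refine ⟨(i : Int), ?_, by simp⟩
        rwa [← pvRow_eq adj u hu0 hun]
    · simp only [hi, decide_false]
      by_contra hb
      rw [Bool.not_eq_false] at hb
      obtain ⟨v, hv, hbit⟩ := (pvOrM_testBit _ _ _).mp hb
      obtain ⟨hv0, hvn⟩ := hmem v hv
      rw [pvNb_getD adj v.toNat (by omega)] at hbit
      rcases (pvNbMask_testBit _ _ _).mp hbit with h | ⟨w, hw, hwi⟩
      · omega
      · have hw' := hPre _ (by rw [← pvRow_eq adj v hv0 hvn]; exact pvRow_mem adj v hv0 hvn) w hw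
        omega

theorem pvCfg_length (n : Nat) (chosen : List Int) : (pvCfg n chosen).length = n := by
  simp [pvCfg, PySem.List.length_pyRange_one]

theorem pvCfg_getElem (n : Nat) (chosen : List Int) (i : Nat) (h : i < (pvCfg n chosen).length) :
    (pvCfg n chosen)[i] = if (i : Int) ∈ chosen then 1 else 0 := by
  have hi : i < n := by rw [pvCfg_length] at h; exact h
  have hlen : i < (PySem.List.pyRange 0 (n : Int) 1).length := by
    rw [PySem.List.length_pyRange_one]; omega
  simp only [pvCfg, List.getElem_map, PySem.List.getElem_pyRange_one 0 (n : Int) i hlen,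
    zero_add]
  by_cases hm : (i : Int) ∈ chosen
  · rw [if_pos (List.contains_iff_mem.mpr hm), if_pos hm]
  · rw [if_neg (fun hc => hm (List.contains_iff_mem.mp hc)), if_neg hm]

theorem pvFoldSet_length (chosen : List Int) : ∀ (c : List Int),
    (chosen.foldl (fun c v => PySem.List.pySetD c v 1) c).length = c.length := by
  induction chosen with
  | nil => intro c; rfl
  | cons v vs ih => intro c; rw [List.foldl_cons, ih, PySem.List.length_pySetD]

theorem pvFoldSet_getD (n : Nat) (chosen : List Int)
    (hmem : ∀ v ∈ chosen, 0 ≤ v ∧ v < (n : Int)) : ∀ (c : List Int), c.length = n →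
    ∀ i, i < n →
    (chosen.foldl (fun c v => PySem.List.pySetD c v 1) c).getD i 0 =
      if (i : Int) ∈ chosen then 1 else c.getD i 0 := by
  induction chosen with
  | nil => intro c hc i hi; simp
  | cons v vs ih =>
    intro c hc i hi
    obtain ⟨hv0, hvn⟩ := hmem v (List.mem_cons_self ..)
    rw [List.foldl_cons, PySem.List.pySetD_of_nonneg c 1 hv0,
      ih (fun w hw => hmem w (List.mem_cons_of_mem v hw)) _ (by simp [hc]) i hi]
    by_cases hm : (i : Int) ∈ vs
    · rw [if_pos hm, if_pos (List.mem_cons_of_mem v hm)]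
    · rw [if_neg hm]
      by_cases hv : (i : Int) = v
      · have hiv : v.toNat = i := by omega
        rw [if_pos (by rw [hv]; exact List.mem_cons_self ..),
          List.getD_eq_getElem _ 0 (by simp [hc]; omega), List.getElem_set, if_pos hiv]
      · have : ¬ (i : Int) ∈ v :: vs := by
          intro hmem'; rcases List.mem_cons.mp hmem' with h | h; exact hv h; exact hm h
        rw [if_neg this]
        have hiv : ¬ v.toNat = i := by omega
        by_cases hin : i < c.length
        · rw [List.getD_eq_getElem _ 0 (by simpa using hin), List.getElem_set, if_neg hiv,
            List.getD_eq_getElem _ 0 hin]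
        · omega

theorem pvCfgA_eq (n : Nat) (chosen : List Int)
    (hmem : ∀ v ∈ chosen, 0 ≤ v ∧ v < (n : Int)) :
    chosen.foldl (fun c v => PySem.List.pySetD c v 1) (List.replicate n 0) = pvCfg n chosen := by
  apply List.ext_getElem
  · rw [pvFoldSet_length, List.length_replicate, pvCfg_length]
  · intro i h1 h2
    have hi : i < n := by rwa [pvFoldSet_length, List.length_replicate] at h1
    rw [pvCfg_getElem n chosen i h2, ← List.getD_eq_getElem _ 0 h1,
      pvFoldSet_getD n chosen hmem _ (List.length_replicate ..) i hi]
    by_cases hm : (i : Int) ∈ chosen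
    · rw [if_pos hm, if_pos hm]
    · rw [if_neg hm, if_neg hm, List.getD_eq_getElem _ 0 (by simpa using hi),
        List.getElem_replicate]

theorem pvSum_cfg (n : Nat) (chosen : List Int) (hnd : chosen.Nodup)
    (hmem : ∀ v ∈ chosen, 0 ≤ v ∧ v < (n : Int)) :
    pvSum (pvCfg n chosen) = (chosen.length : Int) := by
  have h1 : pvSum (pvCfg n chosen) = ((pvCfg n chosen).map (fun x => x)).sum := by
    rw [pvSum, PySem.List.foldl_add (pvCfg n chosen) (fun x => x) 0, zero_add]
  rw [h1, List.map_id']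
  unfold pvCfg
  rw [PySem.List.sum_map_ite_one_zero (fun v => chosen.contains v) _]
  congr 1
  rw [List.countP_eq_length_filter]
  have hperm : ((PySem.List.pyRange 0 (n : Int) 1).filter (fun v => chosen.contains v)).Perm
      chosen := by
    apply (List.perm_ext_iff_of_nodup ((PySem.List.nodup_pyRange_one _ _).filter _) hnd).mpr
    intro x
    rw [List.mem_filter, PySem.List.mem_pyRange_one, List.contains_iff_mem]
    constructor
    · rintro ⟨_, hx⟩; exact hx
    · intro hx; exact ⟨⟨(hmem x hx).1, (hmem x hx).2⟩, hx⟩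
  exact hperm.length_eq

def pvInv1 (adj : List (List Int)) (chosen : List Int) (dist q : List Int) : Prop :=
  dist.length = adj.length ∧
  (∀ x ∈ dist, -1 ≤ x) ∧
  (∀ i, i < adj.length → (dist.getD i (-1) = 0 ↔ (i : Int) ∈ chosen)) ∧
  (∀ i, i < adj.length → dist.getD i (-1) = 1 → ∃ u ∈ chosen, (i : Int) ∈ pvRow adj u) ∧
  (∀ u ∈ q, 0 ≤ u ∧ u < (adj.length : Int) ∧ 0 ≤ dist.getD u.toNat (-1))

theorem pvRelaxFold_inv1 (adj : List (List Int)) (chosen : List Int) (u : Int)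
    (hu0 : 0 ≤ u) (hun : u < (adj.length : Int)) :
    ∀ (ws : List Int), (∀ w ∈ ws, (0 ≤ w ∧ w < (adj.length : Int)) ∧ w ∈ pvRow adj u) →
    ∀ dist q, pvInv1 adj chosen dist q → 0 ≤ dist.getD u.toNat (-1) →
    pvInv1 adj chosen (ws.foldl (pvRelax u) (dist, q)).1 (ws.foldl (pvRelax u) (dist, q)).2 ∧
    0 ≤ (ws.foldl (pvRelax u) (dist, q)).1.getD u.toNat (-1) := by
  intro ws
  induction ws with
  | nil => intro _ dist q hinv hdu; exact ⟨hinv, hdu⟩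
  | cons w ws ih =>
    intro hws dist q hinv hdu
    obtain ⟨⟨hw0, hwn⟩, hwrow⟩ := hws w (List.mem_cons_self ..)
    obtain ⟨hlen, hlb, hzero, hone, hq⟩ := hinv
    have hws' := fun w hw => hws w (List.mem_cons_of_mem _ hw)
    have hut : u.toNat < dist.length := by omega
    have hwt : w.toNat < dist.length := by omega
    rw [List.foldl_cons]
    by_cases hg : PySem.List.pyGetD dist w 0 = -1
    · have hgw : dist[w.toNat] = -1 := by
        rwa [PySem.List.pyGetD_eq_getElem dist 0 hw0 (by omega)] at hg
      have hdu' : PySem.List.pyGetD dist u 0 = dist[u.toNat] :=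
        PySem.List.pyGetD_eq_getElem dist 0 hu0 (by omega)
      have hduv : 0 ≤ dist[u.toNat] := by
        rwa [List.getD_eq_getElem _ (-1) hut] at hdu
      have hstep : pvRelax u (dist, q) w =
          (dist.set w.toNat (dist[u.toNat] + 1), q ++ [w]) := by
        simp only [pvRelax, if_pos hg, hdu', PySem.List.pySetD_of_nonneg dist _ hw0]
      rw [hstep]
      have hget : ∀ i, i < adj.length →
          (dist.set w.toNat (dist[u.toNat] + 1)).getD i (-1) =
            if i = w.toNat then dist[u.toNat] + 1 else dist.getD i (-1) := by
        intro i hi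
        rw [List.getD_eq_getElem _ (-1) (by simpa using (by omega : i < dist.length)),
          List.getElem_set]
        by_cases hiw : i = w.toNat
        · rw [if_pos (by omega), if_pos hiw]
        · rw [if_neg (by omega), if_neg hiw, List.getD_eq_getElem _ (-1) (by omega)]
      apply ih hws' _ (q ++ [w])
      · refine ⟨by simpa using hlen, ?_, ?_, ?_, ?_⟩
        · intro x hx
          rcases List.mem_or_eq_of_mem_set hx with hx' | rfl
          · exact hlb x hx'
          · omega
        · intro i hi
          rw [hget i hi]
          by_cases hiw : i = w.toNat
          · rw [if_pos hiw]
            have : ¬ ((i : Int) ∈ chosen) := by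
              intro hmem
              have := (hzero i hi).mpr hmem
              rw [List.getD_eq_getElem _ (-1) (by omega)] at this
              subst hiw
              omega
            constructor
            · intro h'; omega
            · intro h'; exact absurd h' this
          · rw [if_neg hiw]; exact hzero i hi
        · intro i hi h1
          rw [hget i hi] at h1
          by_cases hiw : i = w.toNat
          · rw [if_pos hiw] at h1
            have hdu0 : dist[u.toNat] = 0 := by omega
            have humem : u ∈ chosen := by
              have := (hzero u.toNat (by omega)).mp
                (by rw [List.getD_eq_getElem _ (-1) hut, hdu0])
              rwa [Int.toNat_of_nonneg hu0] at this
            refine ⟨u, humem, ?_⟩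
            have : (i : Int) = w := by omega
            rwa [this]
          · rw [if_neg hiw] at h1; exact hone i hi h1
        · intro v hv
          rcases List.mem_append.mp hv with hv' | hv'
          · obtain ⟨h1, h2, h3⟩ := hq v hv'
            refine ⟨h1, h2, ?_⟩
            rw [hget v.toNat (by omega)]
            by_cases hvw : v.toNat = w.toNat
            · rw [if_pos hvw]; omega
            · rw [if_neg hvw]; exact h3
          · have : v = w := by simpa using hv'
            subst this
            refine ⟨hw0, hwn, ?_⟩
            rw [hget v.toNat (by omega), if_pos (by rfl)]
            omega
      · rw [hget u.toNat (by omega)]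
        by_cases huw : u.toNat = w.toNat
        · rw [if_pos huw]; omega
        · rw [if_neg huw]; exact hdu
    · have hstep : pvRelax u (dist, q) w = (dist, q) := by simp [pvRelax, hg]
      rw [hstep]
      exact ih hws' dist q ⟨hlen, hlb, hzero, hone, hq⟩ hdu

theorem pvBfsLoop_inv1 (adj : List (List Int)) (chosen : List Int)
    (hPre : ∀ row ∈ adj, ∀ w ∈ row, 0 ≤ w ∧ w < (adj.length : Int)) :
    ∀ (dist q : List Int) (h : ∀ x ∈ dist, -1 ≤ x), pvInv1 adj chosen dist q →
    pvInv1 adj chosen (pvBfsLoop adj dist q h) [] := by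
  intro dist q h
  induction dist, q, h using pvBfsLoop.induct adj with
  | case1 dist h =>
    intro hinv
    rw [pvBfsLoop]
    exact ⟨hinv.1, hinv.2.1, hinv.2.2.1, hinv.2.2.2.1, by simp⟩
  | case2 dist h u qs ih =>
    intro hinv
    rw [pvBfsLoop]
    apply ih
    obtain ⟨hu0, hun, hdu⟩ := hinv.2.2.2.2 u (List.mem_cons_self ..)
    have hrow : ∀ w ∈ (PySem.List.pyGet? adj u).getD [], (0 ≤ w ∧ w < (adj.length : Int)) ∧
        w ∈ pvRow adj u := by
      intro w hw
      exact ⟨hPre _ (pvRow_mem adj u hu0 hun) w hw, hw⟩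
    have hinv' : pvInv1 adj chosen dist qs :=
      ⟨hinv.1, hinv.2.1, hinv.2.2.1, hinv.2.2.2.1,
        fun v hv => hinv.2.2.2.2 v (List.mem_cons_of_mem u hv)⟩
    exact (pvRelaxFold_inv1 adj chosen u hu0 hun _ hrow dist qs hinv' hdu).1

def pvInv2 (adj : List (List Int)) (dist q : List Int) : Prop :=
  dist.length = adj.length ∧
  (∀ x ∈ dist, -1 ≤ x ∧ x ≤ 1) ∧
  (∃ qa qb, q = qa ++ qb ∧
    (∀ u ∈ qa, 0 ≤ u ∧ u < (adj.length : Int) ∧ dist.getD u.toNat (-1) = 0) ∧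
    (∀ u ∈ qb, 0 ≤ u ∧ u < (adj.length : Int) ∧ dist.getD u.toNat (-1) = 1)) ∧
  (∀ i, i < adj.length → dist.getD i (-1) = -1 →
    ∃ u ∈ q, dist.getD u.toNat (-1) = 0 ∧ (i : Int) ∈ pvRow adj u)

-- when no cell is -1, the relax fold does nothing
theorem pvRelaxFold_id (u : Int) (ws : List Int) : ∀ (dist q : List Int),
    (∀ j, j < dist.length → dist.getD j (-1) ≠ -1) →
    ws.foldl (pvRelax u) (dist, q) = (dist, q) := by
  induction ws with
  | nil => intro dist q _; rfl
  | cons w ws ih =>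
    intro dist q hno
    rw [List.foldl_cons]
    have hg : ¬ PySem.List.pyGetD dist w 0 = -1 := by
      intro hg
      obtain ⟨j, hj, hcell, _⟩ := pvGetD_neg_one_split dist w 0 hg
      exact hno j hj (by rw [List.getD_eq_getElem _ (-1) hj, hcell])
    rw [show pvRelax u (dist, q) w = (dist, q) by simp [pvRelax, hg]]
    exact ih dist q hno

-- relax fold from a popped vertex at distance 0: writes only 1s
theorem pvRelaxFold_du0 (adj : List (List Int)) (u : Int)
    (hu0 : 0 ≤ u) (hun : u < (adj.length : Int)) :
    ∀ (ws : List Int), (∀ w ∈ ws, 0 ≤ w ∧ w < (adj.length : Int)) →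
    ∀ dist q, dist.length = adj.length → (∀ x ∈ dist, -1 ≤ x ∧ x ≤ 1) →
    dist.getD u.toNat (-1) = 0 →
    (ws.foldl (pvRelax u) (dist, q)).1.length = adj.length ∧
    (∀ x ∈ (ws.foldl (pvRelax u) (dist, q)).1, -1 ≤ x ∧ x ≤ 1) ∧
    (∃ app, (ws.foldl (pvRelax u) (dist, q)).2 = q ++ app ∧
      ∀ v ∈ app, 0 ≤ v ∧ v < (adj.length : Int) ∧
        (ws.foldl (pvRelax u) (dist, q)).1.getD v.toNat (-1) = 1) ∧
    (∀ i, i < adj.length → dist.getD i (-1) ≠ -1 →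
      (ws.foldl (pvRelax u) (dist, q)).1.getD i (-1) = dist.getD i (-1)) ∧
    (∀ w ∈ ws, (ws.foldl (pvRelax u) (dist, q)).1.getD w.toNat (-1) ≠ -1) := by
  intro ws
  induction ws with
  | nil =>
    intro _ dist q hlen hb _
    exact ⟨hlen, hb, ⟨[], by simp, by simp⟩, fun i _ _ => rfl, by simp⟩
  | cons w ws ih =>
    intro hws dist q hlen hb hdu
    obtain ⟨hw0, hwn⟩ := hws w (List.mem_cons_self ..)
    have hws' := fun w hw => hws w (List.mem_cons_of_mem _ hw)
    have hut : u.toNat < dist.length := by omega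
    have hwt : w.toNat < dist.length := by omega
    rw [List.foldl_cons]
    by_cases hg : PySem.List.pyGetD dist w 0 = -1
    · have hgw : dist[w.toNat] = -1 := by
        rwa [PySem.List.pyGetD_eq_getElem dist 0 hw0 (by omega)] at hg
      have hdu' : PySem.List.pyGetD dist u 0 = dist[u.toNat] :=
        PySem.List.pyGetD_eq_getElem dist 0 hu0 (by omega)
      have hdu0 : dist[u.toNat] = 0 := by
        rwa [List.getD_eq_getElem _ (-1) hut] at hdu
      have hstep : pvRelax u (dist, q) w = (dist.set w.toNat 1, q ++ [w]) := by
        simp only [pvRelax, if_pos hg, hdu', hdu0, PySem.List.pySetD_of_nonneg dist _ hw0]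
        norm_num
      rw [hstep]
      have hget : ∀ i, i < adj.length →
          (dist.set w.toNat 1).getD i (-1) =
            if i = w.toNat then 1 else dist.getD i (-1) := by
        intro i hi
        rw [List.getD_eq_getElem _ (-1) (by simpa using (by omega : i < dist.length)),
          List.getElem_set]
        by_cases hiw : i = w.toNat
        · rw [if_pos (by omega), if_pos hiw]
        · rw [if_neg (by omega), if_neg hiw, List.getD_eq_getElem _ (-1) (by omega)]
      have hlen' : (dist.set w.toNat 1).length = adj.length := by simpa using hlen
      have hb' : ∀ x ∈ dist.set w.toNat 1, -1 ≤ x ∧ x ≤ 1 := by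
        intro x hx
        rcases List.mem_or_eq_of_mem_set hx with hx' | rfl
        · exact hb x hx'
        · omega
      have hdu2 : (dist.set w.toNat 1).getD u.toNat (-1) = 0 := by
        rw [hget u.toNat (by omega)]
        by_cases huw : u.toNat = w.toNat
        · simp only [huw] at hdu0
          rw [hgw] at hdu0
          exact absurd hdu0 (by norm_num)
        · rw [if_neg huw]; exact hdu
      obtain ⟨l1, l2, ⟨app, happ, happ1⟩, l4, l5⟩ :=
        ih hws' (dist.set w.toNat 1) (q ++ [w]) hlen' hb' hdu2
      refine ⟨l1, l2, ⟨w :: app, by simp [happ], ?_⟩, ?_, ?_⟩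
      · intro v hv
        rcases List.mem_cons.mp hv with rfl | hv'
        · refine ⟨hw0, hwn, ?_⟩
          rw [l4 v.toNat (by omega) (by rw [hget v.toNat (by omega), if_pos (by omega)]; omega),
            hget v.toNat (by omega), if_pos (by omega)]
        · exact happ1 v hv'
      · intro i hi hni
        rw [l4 i hi (by rw [hget i hi]; split <;> omega), hget i hi]
        by_cases hiw : i = w.toNat
        · exact absurd (by rw [hiw, List.getD_eq_getElem _ (-1) (by omega)]; exact hgw) hni
        · rw [if_neg hiw]
      · intro v hv
        rcases List.mem_cons.mp hv with rfl | hv'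
        · rw [l4 v.toNat (by omega) (by rw [hget v.toNat (by omega), if_pos (by omega)]; omega),
            hget v.toNat (by omega), if_pos (by omega)]
          omega
        · exact l5 v hv'
    · have hstep : pvRelax u (dist, q) w = (dist, q) := by simp [pvRelax, hg]
      rw [hstep]
      obtain ⟨l1, l2, l3, l4, l5⟩ := ih hws' dist q hlen hb hdu
      refine ⟨l1, l2, l3, l4, ?_⟩
      intro v hv
      rcases List.mem_cons.mp hv with rfl | hv'
      · have hvw : dist.getD v.toNat (-1) ≠ -1 := by
          intro hm
          apply hg
          rw [List.getD_eq_getElem _ (-1) (by omega)] at hm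
          rw [PySem.List.pyGetD_eq_getElem dist 0 hw0 (by omega)]
          exact hm
        rw [l4 v.toNat (by omega) hvw]
        exact hvw
      · exact l5 v hv'

theorem pvBfsLoop_inv2 (adj : List (List Int))
    (hPre : ∀ row ∈ adj, ∀ w ∈ row, 0 ≤ w ∧ w < (adj.length : Int)) :
    ∀ (dist q : List Int) (h : ∀ x ∈ dist, -1 ≤ x), pvInv2 adj dist q →
    (pvBfsLoop adj dist q h).length = adj.length ∧
    (∀ i, i < adj.length →
      (pvBfsLoop adj dist q h).getD i (-1) = 0 ∨ (pvBfsLoop adj dist q h).getD i (-1) = 1) := by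
  intro dist q h
  induction dist, q, h using pvBfsLoop.induct adj with
  | case1 dist h =>
    intro hinv
    obtain ⟨hlen, hb, _, huncov⟩ := hinv
    rw [pvBfsLoop]
    refine ⟨hlen, fun i hi => ?_⟩
    by_cases hneg : dist.getD i (-1) = -1
    · obtain ⟨u, hu, _⟩ := huncov i hi hneg
      exact absurd hu List.not_mem_nil
    · have hmem : dist.getD i (-1) ∈ dist := by
        rw [List.getD_eq_getElem _ (-1) (by omega)]
        exact List.getElem_mem _
      obtain ⟨hb1, hb2⟩ := hb _ hmem
      omega
  | case2 dist h u qs ih =>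
    intro hinv
    obtain ⟨hlen, hb, ⟨qa, qb, heq, hqa, hqb⟩, huncov⟩ := hinv
    rw [pvBfsLoop]
    apply ih
    cases qa with
    | nil =>
      have hqb' : qb = u :: qs := by simpa using heq.symm
      have hnone : ∀ j, j < dist.length → dist.getD j (-1) ≠ -1 := by
        intro j hj hneg
        obtain ⟨u', hu', h0, _⟩ := huncov j (by omega) hneg
        have := (hqb u' (by rw [hqb']; exact hu')).2.2
        omega
      have hid := pvRelaxFold_id u ((PySem.List.pyGet? adj u).getD []) dist qs hnone
      rw [hid]
      refine ⟨hlen, hb, ⟨[], qs, by simp, by simp, ?_⟩, ?_⟩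
      · intro v hv
        exact hqb v (by rw [hqb']; exact List.mem_cons_of_mem u hv)
      · intro i hi hneg
        exact absurd hneg (hnone i (by omega))
    | cons a qa' =>
      have hua : u = a ∧ qs = qa' ++ qb := by
        constructor
        · have := heq; simp at this; exact this.1
        · have := heq; simp at this; exact this.2
      obtain ⟨rfl, hqs⟩ := hua
      obtain ⟨hu0, hun, hdu⟩ := hqa u (List.mem_cons_self ..)
      have hrowmem : ∀ w ∈ (PySem.List.pyGet? adj u).getD [], 0 ≤ w ∧ w < (adj.length : Int) :=
        fun w hw => hPre _ (pvRow_mem adj u hu0 hun) w hw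
      obtain ⟨l1, l2, ⟨app, happ, happ1⟩, l4, l5⟩ :=
        pvRelaxFold_du0 adj u hu0 hun _ hrowmem dist qs hlen hb hdu
      refine ⟨l1, l2, ⟨qa', qb ++ app, ?_, ?_, ?_⟩, ?_⟩
      · rw [happ, hqs, List.append_assoc]
      · intro v hv
        obtain ⟨h1, h2, h3⟩ := hqa v (List.mem_cons_of_mem _ hv)
        exact ⟨h1, h2, by rw [l4 v.toNat (by omega) (by omega)]; exact h3⟩
      · intro v hv
        rcases List.mem_append.mp hv with hv' | hv'
        · obtain ⟨h1, h2, h3⟩ := hqb v hv'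
          exact ⟨h1, h2, by rw [l4 v.toNat (by omega) (by omega)]; exact h3⟩
        · exact happ1 v hv'
      · intro i hi hneg
        have hold : dist.getD i (-1) = -1 := by
          by_contra hne
          rw [l4 i hi hne] at hneg
          exact hne hneg
        obtain ⟨u', hu', h0, hrow⟩ := huncov i hi hold
        rcases List.mem_cons.mp hu' with rfl | hu''
        · exfalso
          apply l5 (i : Int) (by exact hrow)
          simpa using hneg
        · have hu3 : u' ∈ qa' ++ qb := by rw [← hqs]; exact hu''
          have hbound : 0 ≤ u' ∧ u' < (adj.length : Int) := by
            rcases List.mem_append.mp hu3 with hm | hm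
            · exact ⟨(hqa u' (List.mem_cons_of_mem _ hm)).1,
                (hqa u' (List.mem_cons_of_mem _ hm)).2.1⟩
            · exact ⟨(hqb u' hm).1, (hqb u' hm).2.1⟩
          refine ⟨u', by rw [happ]; exact List.mem_append_left _ hu'', ?_, hrow⟩
          rw [l4 u'.toNat (by omega) (by omega)]
          exact h0

theorem pvInitFold (config : List Int) (n : Nat) :
    ∀ (L : List Int), (∀ v ∈ L, 0 ≤ v ∧ v < (n : Int)) → ∀ (d q : List Int), d.length = n →
    ((L.foldl (fun (s : List Int × List Int) v =>
        if PySem.List.pyGetD config v 0 = 1 then (PySem.List.pySetD s.1 v 0, s.2 ++ [v]) else s)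
        (d, q)).1.length = n) ∧
    (∀ i, i < n →
      (L.foldl (fun (s : List Int × List Int) v =>
        if PySem.List.pyGetD config v 0 = 1 then (PySem.List.pySetD s.1 v 0, s.2 ++ [v]) else s)
        (d, q)).1.getD i (-1) =
        if ((i : Int) ∈ L ∧ PySem.List.pyGetD config (i : Int) 0 = 1) then 0
        else d.getD i (-1)) ∧
    (L.foldl (fun (s : List Int × List Int) v =>
        if PySem.List.pyGetD config v 0 = 1 then (PySem.List.pySetD s.1 v 0, s.2 ++ [v]) else s)
        (d, q)).2 = q ++ L.filter (fun v => decide (PySem.List.pyGetD config v 0 = 1)) := by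
  intro L
  induction L with
  | nil => intro _ d q hd; exact ⟨hd, fun i hi => by simp, by simp⟩
  | cons v L ih =>
    intro hL d q hd
    obtain ⟨hv0, hvn⟩ := hL v (List.mem_cons_self ..)
    have hL' := fun w hw => hL w (List.mem_cons_of_mem _ hw)
    rw [List.foldl_cons]
    by_cases hc : PySem.List.pyGetD config v 0 = 1
    · rw [if_pos hc, PySem.List.pySetD_of_nonneg d 0 hv0]
      obtain ⟨l1, l2, l3⟩ := ih hL' (d.set v.toNat 0) (q ++ [v]) (by simpa using hd)
      refine ⟨l1, ?_, by rw [l3, List.filter_cons, if_pos (by simpa using hc)]; simp⟩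
      intro i hi
      rw [l2 i hi]
      have hset : (d.set v.toNat 0).getD i (-1) =
          if i = v.toNat then 0 else d.getD i (-1) := by
        rw [List.getD_eq_getElem _ (-1) (by rw [List.length_set, hd]; omega), List.getElem_set]
        by_cases hiv : i = v.toNat
        · rw [if_pos (by omega), if_pos hiv]
        · rw [if_neg (by omega), if_neg hiv, List.getD_eq_getElem _ (-1) (by omega)]
      by_cases h1 : (i : Int) ∈ L ∧ PySem.List.pyGetD config (i : Int) 0 = 1
      · rw [if_pos h1, if_pos ⟨List.mem_cons_of_mem _ h1.1, h1.2⟩]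
      · rw [if_neg h1, hset]
        by_cases hiv : i = v.toNat
        · have hcv : (i : Int) = v := by omega
          rw [if_pos hiv, if_pos ⟨by rw [hcv]; exact List.mem_cons_self .., by rwa [hcv]⟩]
        · have : ¬ ((i : Int) ∈ v :: L ∧ PySem.List.pyGetD config (i : Int) 0 = 1) := by
            rintro ⟨hm, hcen⟩
            rcases List.mem_cons.mp hm with he | hm'
            · exact hiv (by omega)
            · exact h1 ⟨hm', hcen⟩
          rw [if_neg hiv, if_neg this]
    · rw [if_neg hc]
      obtain ⟨l1, l2, l3⟩ := ih hL' d q hd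
      refine ⟨l1, ?_, by rw [l3, List.filter_cons, if_neg (by simpa using hc)]⟩
      intro i hi
      rw [l2 i hi]
      by_cases h1 : (i : Int) ∈ L ∧ PySem.List.pyGetD config (i : Int) 0 = 1
      · rw [if_pos h1, if_pos ⟨List.mem_cons_of_mem _ h1.1, h1.2⟩]
      · rw [if_neg h1]
        have : ¬ ((i : Int) ∈ v :: L ∧ PySem.List.pyGetD config (i : Int) 0 = 1) := by
          rintro ⟨hm, hcen⟩
          rcases List.mem_cons.mp hm with he | hm'
          · exact hc (by rwa [he] at hcen)
          · exact h1 ⟨hm', hcen⟩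
        rw [if_neg this]

theorem pvCenter_iff (n : Nat) (chosen : List Int) (v : Int) (h0 : 0 ≤ v) (h1 : v < (n : Int)) :
    PySem.List.pyGetD (pvCfg n chosen) v 0 = 1 ↔ v ∈ chosen := by
  unfold pvCfg
  rw [PySem.List.pyGetD_map_pyRange_of_nonneg _ (n : Int) v 0 h0 h1]
  by_cases hm : v ∈ chosen
  · rw [if_pos (List.contains_iff_mem.mpr hm)]
    simp [hm]
  · rw [if_neg (fun hc => hm (List.contains_iff_mem.mp hc))]
    simp [hm]

theorem pvInit_props (adj : List (List Int)) (chosen : List Int) :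
    ((PySem.List.pyRange 0 (adj.length : Int) 1).foldl
      (fun (s : List Int × List Int) v =>
        if PySem.List.pyGetD (pvCfg adj.length chosen) v 0 = 1
        then (PySem.List.pySetD s.1 v 0, s.2 ++ [v]) else s)
      (List.replicate adj.length (-1), [])).1.length = adj.length ∧
    (∀ i, i < adj.length →
      ((PySem.List.pyRange 0 (adj.length : Int) 1).foldl
        (fun (s : List Int × List Int) v =>
          if PySem.List.pyGetD (pvCfg adj.length chosen) v 0 = 1
          then (PySem.List.pySetD s.1 v 0, s.2 ++ [v]) else s)
        (List.replicate adj.length (-1), [])).1.getD i (-1) =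
        if (i : Int) ∈ chosen then 0 else -1) ∧
    (∀ u, u ∈ ((PySem.List.pyRange 0 (adj.length : Int) 1).foldl
        (fun (s : List Int × List Int) v =>
          if PySem.List.pyGetD (pvCfg adj.length chosen) v 0 = 1
          then (PySem.List.pySetD s.1 v 0, s.2 ++ [v]) else s)
        (List.replicate adj.length (-1), [])).2 ↔
      (0 ≤ u ∧ u < (adj.length : Int) ∧ u ∈ chosen)) := by
  obtain ⟨l1, l2, l3⟩ := pvInitFold (pvCfg adj.length chosen) adj.length
    (PySem.List.pyRange 0 (adj.length : Int) 1)
    (fun v hv => by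
      have := PySem.List.mem_pyRange_one.mp hv
      exact ⟨this.1, this.2⟩)
    (List.replicate adj.length (-1)) [] (List.length_replicate ..)
  refine ⟨l1, ?_, ?_⟩
  · intro i hi
    rw [l2 i hi]
    have hmemL : (i : Int) ∈ PySem.List.pyRange 0 (adj.length : Int) 1 :=
      PySem.List.mem_pyRange_one.mpr ⟨by omega, by omega⟩
    have hrep : (List.replicate adj.length (-1 : Int)).getD i (-1) = -1 := by
      rw [List.getD_eq_getElem _ (-1) (by simpa using hi), List.getElem_replicate]
    by_cases hm : (i : Int) ∈ chosen
    · rw [if_pos ⟨hmemL, (pvCenter_iff adj.length chosen i (by omega) (by omega)).mpr hm⟩,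
        if_pos hm]
    · rw [if_neg ?_, if_neg hm, hrep]
      rintro ⟨_, hcen⟩
      exact hm ((pvCenter_iff adj.length chosen i (by omega) (by omega)).mp hcen)
  · intro u
    rw [l3]
    simp only [List.nil_append, List.mem_filter, PySem.List.mem_pyRange_one, decide_eq_true_eq]
    constructor
    · rintro ⟨⟨h0, h1⟩, hcen⟩
      exact ⟨h0, h1, (pvCenter_iff adj.length chosen u h0 h1).mp hcen⟩
    · rintro ⟨h0, h1, hm⟩
      exact ⟨⟨h0, h1⟩, (pvCenter_iff adj.length chosen u h0 h1).mpr hm⟩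

theorem pvBfsLoop_proof_irrel (adj : List (List Int)) (dist q : List Int)
    (h1 h2 : ∀ x ∈ dist, -1 ≤ x) : pvBfsLoop adj dist q h1 = pvBfsLoop adj dist q h2 := rfl

theorem pvFeas_iff (adj : List (List Int)) (k : Int) (chosen : List Int)
    (hPre : ∀ row ∈ adj, ∀ w ∈ row, 0 ≤ w ∧ w < (adj.length : Int))
    (hn : 0 < adj.length) (hnd : chosen.Nodup)
    (hmem : ∀ v ∈ chosen, 0 ≤ v ∧ v < (adj.length : Int))
    (hkl : (chosen.length : Int) = k) :
    (adv_is_feasible_multicenter adj (pvCfg adj.length chosen) k = true) ↔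
    (∀ i, i < adj.length → pvCov adj chosen i) := by
  obtain ⟨i1, i2, i3⟩ := pvInit_props adj chosen
  have hsum : pvSum (pvCfg adj.length chosen) = k := by
    rw [pvSum_cfg _ _ hnd hmem, hkl]
  unfold adv_is_feasible_multicenter
  rw [if_neg (not_not_intro hsum)]
  unfold adv_bfs_distances
  simp only []
  set F := (List.foldl
      (fun (s : List Int × List Int) v =>
        if PySem.List.pyGetD (pvCfg adj.length chosen) v 0 = 1
        then (PySem.List.pySetD s.1 v 0, s.2 ++ [v]) else s)
      (List.replicate adj.length (-1), []) (PySem.List.pyRange 0 (adj.length : Int) 1)) with hF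
  have hInv1init : pvInv1 adj chosen F.1 F.2 := by
    refine ⟨i1, ?_, ?_, ?_, ?_⟩
    · intro x hx
      obtain ⟨j, hj, hxj⟩ := List.mem_iff_getElem.mp hx
      have := i2 j (by omega)
      rw [List.getD_eq_getElem _ (-1) hj, hxj] at this
      split at this <;> omega
    · intro i hi
      rw [i2 i hi]
      by_cases hm : (i : Int) ∈ chosen
      · simp [hm]
      · simp [hm]
    · intro i hi h1
      rw [i2 i hi] at h1
      split at h1 <;> omega
    · intro u hu
      obtain ⟨h0, h1, hm⟩ := (i3 u).mp hu
      refine ⟨h0, h1, ?_⟩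
      rw [i2 u.toNat (by omega), if_pos (by rwa [Int.toNat_of_nonneg h0])]
  have hlb0 : ∀ x ∈ F.1, -1 ≤ x := hInv1init.2.1
  rw [pvBfsLoop_proof_irrel (h2 := hlb0)]
  set D := pvBfsLoop adj F.1 F.2 hlb0 with hD
  have hInv1 : pvInv1 adj chosen D [] := pvBfsLoop_inv1 adj chosen hPre F.1 F.2 hlb0 hInv1init
  obtain ⟨f1, f2, f3, f4, -⟩ := hInv1
  by_cases hcov : ∀ i, i < adj.length → pvCov adj chosen i
  · have hInv2init : pvInv2 adj F.1 F.2 := by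
      refine ⟨i1, ?_, ⟨F.2, [], by simp, ?_, by simp⟩, ?_⟩
      · intro x hx
        obtain ⟨j, hj, hxj⟩ := List.mem_iff_getElem.mp hx
        have := i2 j (by omega)
        rw [List.getD_eq_getElem _ (-1) hj, hxj] at this
        split at this <;> omega
      · intro u hu
        obtain ⟨h0, h1, hm⟩ := (i3 u).mp hu
        refine ⟨h0, h1, ?_⟩
        rw [i2 u.toNat (by omega), if_pos (by rwa [Int.toNat_of_nonneg h0])]
      · intro i hi hneg
        rw [i2 i hi] at hneg
        have hnm : ¬ (i : Int) ∈ chosen := by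
          intro hm; rw [if_pos hm] at hneg; omega
        rcases hcov i hi with hm | ⟨u, hu, hrow⟩
        · exact absurd hm hnm
        · obtain ⟨h0, h1⟩ := hmem u hu
          refine ⟨u, (i3 u).mpr ⟨h0, h1, hu⟩, ?_, hrow⟩
          rw [i2 u.toNat (by omega), if_pos (by rwa [Int.toNat_of_nonneg h0])]
    obtain ⟨g1, g2⟩ := pvBfsLoop_inv2 adj hPre F.1 F.2 hlb0 hInv2init
    rw [← hD] at g1 g2
    have hany : D.any (fun d => d == -1) = false := by
      rw [List.any_eq_false]
      intro x hx
      obtain ⟨j, hj, hxj⟩ := List.mem_iff_getElem.mp hx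
      have := g2 j (by omega)
      rw [List.getD_eq_getElem _ (-1) hj, hxj] at this
      simp only [beq_iff_eq]
      omega
    rw [hany]
    simp only [Bool.false_eq_true, if_false]
    cases hM : PySem.List.max? D (fun x => x) with
    | none =>
      rw [PySem.List.max?_eq_none_iff] at hM
      rw [hM] at g1
      simp at g1
      omega
    | some m =>
      obtain ⟨j, hj, hmj⟩ := List.mem_iff_getElem.mp (PySem.List.max?_mem hM)
      have := g2 j (by omega)
      rw [List.getD_eq_getElem _ (-1) hj, hmj] at this
      simp only [decide_eq_true_eq]
      constructor
      · intro _; exact hcov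
      · intro _; omega
  · constructor
    swap
    · intro h; exact absurd h hcov
    intro hfeas
    exfalso
    apply hcov
    intro i hi
    cases hA : D.any (fun d => d == -1) with
    | true =>
      rw [hA] at hfeas
      simp at hfeas
    | false =>
      rw [hA] at hfeas
      simp only [Bool.false_eq_true, if_false] at hfeas
      cases hM : PySem.List.max? D (fun x => x) with
      | none =>
        rw [hM] at hfeas
        simp at hfeas
      | some m =>
        rw [hM] at hfeas
        simp only [decide_eq_true_eq] at hfeas
        have hij : i < D.length := by omega
        have hx : D.getD i (-1) = D[i]'hij := List.getD_eq_getElem _ (-1) hij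
        have hmem' : D[i]'hij ∈ D := List.getElem_mem _
        have hne : ¬ (D[i]'hij == -1) = true := List.any_eq_false.mp hA _ hmem'
        simp only [beq_iff_eq] at hne
        have hle : D[i]'hij ≤ m := PySem.List.max?_isMax hM _ hmem'
        have hlb : -1 ≤ D[i]'hij := f2 _ hmem'
        have hcases : D[i]'hij = 0 ∨ D[i]'hij = 1 := by omega
        rcases hcases with h0 | h1
        · exact Or.inl ((f3 i hi).mp (by rw [hx, h0]))
        · exact Or.inr (f4 i hi (by rw [hx, h1]))

theorem pvA_zero (adj : List (List Int)) (hn : 0 < adj.length) :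
    adv_solve_mc adj 0 = none := by
  have hfeas : adv_is_feasible_multicenter adj (List.replicate adj.length 0) 0 = false := by
    have hsum : pvSum (List.replicate adj.length (0 : Int)) = 0 := by
      rw [pvSum, PySem.List.foldl_add _ (fun x => x) 0]
      simp
    unfold adv_is_feasible_multicenter
    rw [if_neg (not_not_intro hsum)]
    unfold adv_bfs_distances
    simp only []
    have hcenter : ∀ v : Int, 0 ≤ v → v < (adj.length : Int) →
        ¬ PySem.List.pyGetD (List.replicate adj.length (0 : Int)) v 0 = 1 := by
      intro v h0 h1
      rw [PySem.List.pyGetD_eq_getElem _ 0 h0 (by simpa using h1), List.getElem_replicate]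
      norm_num
    obtain ⟨l1, l2, l3⟩ := pvInitFold (List.replicate adj.length (0 : Int)) adj.length
      (PySem.List.pyRange 0 (adj.length : Int) 1)
      (fun v hv => by
        have := PySem.List.mem_pyRange_one.mp hv
        exact ⟨this.1, this.2⟩)
      (List.replicate adj.length (-1)) [] (List.length_replicate ..)
    set F := (List.foldl
        (fun (s : List Int × List Int) v =>
          if PySem.List.pyGetD (List.replicate adj.length (0 : Int)) v 0 = 1
          then (PySem.List.pySetD s.1 v 0, s.2 ++ [v]) else s)
        (List.replicate adj.length (-1), []) (PySem.List.pyRange 0 (adj.length : Int) 1))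
      with hF
    have hq : F.2 = [] := by
      rw [l3, List.nil_append, List.filter_eq_nil_iff]
      intro v hv
      have := PySem.List.mem_pyRange_one.mp hv
      simpa using hcenter v this.1 this.2
    have hcell : F.1.getD 0 (-1) = -1 := by
      rw [l2 0 hn, if_neg ?hc]
      case hc =>
        rintro ⟨_, hcen⟩
        exact hcenter 0 le_rfl (by exact_mod_cast hn) hcen
      rw [List.getD_eq_getElem _ (-1) (by simpa using hn), List.getElem_replicate]
    rw [hq]
    have hloop : ∀ h, pvBfsLoop adj F.1 [] h = F.1 := fun h => by rw [pvBfsLoop]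
    rw [hloop]
    have hany : F.1.any (fun d => d == -1) = true := by
      rw [List.any_eq_true]
      refine ⟨F.1[0]'(by omega), List.getElem_mem _, ?_⟩
      rw [← List.getD_eq_getElem _ (-1) (by omega), hcell]
      rfl
    rw [hany]
    rfl
  unfold adv_solve_mc
  simp only [Int.toNat_zero, pvCombos, List.findSome?, List.foldl_nil]
  rw [hfeas]
  rfl

theorem pvMain : ∀ (adj : List (List Int)) (k : Int),
    Pre_adv_solve_mc adj k → adv_solve_mc adj k = adv_solve_mc_alt adj k := by
  intro adj k hpre
  obtain ⟨hk, hne, hcases⟩ := hpre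
  rw [pvAlt_eq adj k hk]
  rcases hcases with hk0 | hkn | hrows
  · -- k = 0 and (by Pre_) adj ≠ []: both searches reject the empty center set
    subst hk0
    have hn : 0 < adj.length := by
      rcases Nat.eq_zero_or_pos adj.length with h0 | h
      · exact absurd ⟨List.length_eq_zero_iff.mp h0, rfl⟩ hne
      · exact h
    rw [pvA_zero adj hn]
    simp only [Int.toNat_zero, pvCombos, List.findSome?]
    have hfull : pvOrM (pvNbList adj) [] ≠ (1 <<< adj.length) - 1 := by
      simp only [pvOrM, List.foldl_nil]
      have h2 : 2 ≤ 2 ^ adj.length := by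
        calc 2 = 2 ^ 1 := by norm_num
        _ ≤ 2 ^ adj.length := Nat.pow_le_pow_right (by norm_num) (by omega)
      rw [Nat.shiftLeft_eq, one_mul]
      omega
    simp [hfull]
  · -- k exceeds the number of vertices: no combination exists
    unfold adv_solve_mc
    rw [pvCombos_nil _ _ (by rw [PySem.List.length_pyRange_one]; omega)]
    rfl
  · -- the main case: adjacency entries all in [0, n)
    unfold adv_solve_mc
    simp only []
    apply pvFindSome?_congr
    intro chosen hcho
    obtain ⟨hsub, hlencho⟩ := pvCombos_mem _ _ chosen hcho
    have hmem : ∀ v ∈ chosen, 0 ≤ v ∧ v < (adj.length : Int) := by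
      intro v hv
      have := PySem.List.mem_pyRange_one.mp (hsub.subset hv)
      exact ⟨this.1, this.2⟩
    have hnd : chosen.Nodup := hsub.nodup (PySem.List.nodup_pyRange_one _ _)
    have hn : 0 < adj.length := by
      rcases Nat.eq_zero_or_pos adj.length with h0 | h
      · exfalso
        have hnil : adj = [] := List.length_eq_zero_iff.mp h0
        have hkpos : 0 < k := by
          rcases lt_or_eq_of_le hk with h' | h'
          · exact h'
          · exact absurd ⟨hnil, h'.symm⟩ hne
        obtain ⟨m, hm⟩ : ∃ m, k.toNat = m + 1 := ⟨k.toNat - 1, by omega⟩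
        rw [h0] at hcho
        rw [PySem.List.pyRange_one_eq_nil (by norm_num), hm] at hcho
        simp [pvCombos] at hcho
      · exact h
    rw [pvCfgA_eq adj.length chosen hmem]
    have hiff := (pvFeas_iff adj k chosen hrows hn hnd hmem
        (by rw [hlencho]; exact Int.toNat_of_nonneg hk)).trans
      (pvMask_full_iff adj chosen hrows hmem).symm
    by_cases hf : pvOrM (pvNbList adj) chosen = (1 <<< adj.length) - 1
    · rw [if_pos (hiff.mpr hf), if_pos hf]
    · rw [if_neg (fun h => hf (hiff.mp h)), if_neg hf]

theorem adv_solve_mc_spec : Claim_equal_adv_solve_mc := by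
  intro adj k _ hpre
  exact pvMain adj k hpre
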